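-- pv_equiv track=rewrite | github.com/TheRobban02/Mini-project-Python | count_unique_words_1.py | top_ten
-- ===== SOURCE A (Python) =====
-- def top_ten(lst):
--     dict_of_words = {}
--
--     # Counts all the words in dictionary, it turns all words in to lower case!
--     for x in lst:
--         if dict_of_words.get(x) is None:
--             dict_of_words[x] = 1
--         else:
--             dict_of_words[x] += 1
--
--     # sorts by highest value and recast to dictionary
--     dict_of_words = dict(sorted(dict_of_words.items(),
--                                 key=lambda x: x[1], reverse=True))
--
--     # Creates a dictionary containing highest value if word is larger than 4
--     top_words = {}
--     for key, value in dict_of_words.items():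
--         if len(top_words) == 10:
--             break
--         if len(key) > 4:
--             top_words[key] = value
--
--     # returns top 10 words dictionary, ordered by highest value
--     return top_words
-- ===== SOURCE B (Python) =====
-- def top_ten(lst):
--     # Count only the words longer than 4 characters.
--     counts = {}
--     for w in lst:
--         if len(w) > 4:
--             counts[w] = counts.get(w, 0) + 1
--     # Counting sort: bucket the words by their count, remembering the highest count.
--     buckets = {}
--     top = 0
--     for w, c in counts.items():
--         if c in buckets:
--             buckets[c].append(w)
--         else:
--             buckets[c] = [w]
--         if c > top:
--             top = c
--     # Walk the counts from highest to lowest, keeping at most ten words.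
--     result = {}
--     for c in range(top, 0, -1):
--         for w in buckets.get(c, []):
--             if len(result) < 10:
--                 result[w] = c
--     return result
-- ===== Notes on version B (the rewrite author's own statement) =====
-- stated objective: alternative
-- what changed: B replaces A's comparison sort entirely with a counting/bucket sort: it counts only the long words, buckets the words by their count in a dict, then walks the counts downward from the maximum emitting at most ten words, instead of A's count-everything dict, sorted() by value, dict recast and break-out filter loop.
import Mathlib
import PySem

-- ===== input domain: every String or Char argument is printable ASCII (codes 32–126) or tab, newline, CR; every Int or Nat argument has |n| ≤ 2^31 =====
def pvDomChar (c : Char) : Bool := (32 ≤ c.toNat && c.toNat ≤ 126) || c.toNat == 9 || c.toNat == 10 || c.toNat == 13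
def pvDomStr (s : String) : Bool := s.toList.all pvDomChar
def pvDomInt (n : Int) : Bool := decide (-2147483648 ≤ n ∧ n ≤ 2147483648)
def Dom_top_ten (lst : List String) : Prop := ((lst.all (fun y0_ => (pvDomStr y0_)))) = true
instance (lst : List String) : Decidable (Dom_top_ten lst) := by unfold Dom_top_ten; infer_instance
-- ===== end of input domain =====

-- B replaces A's comparison sort with a counting/bucket sort: it counts only the long words,
-- buckets the words by their count, then walks the counts from the highest down, keeping at
-- most ten words; A counts everything, sorts by value, recasts to a dict and filters with a
-- break-out loop.

-- ===== PORT A =====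
-- the second for-loop of A (break when len(top_words) == 10)
def topTenLoop : List (String × Int) → PySem.Dict String Int → PySem.Dict String Int
  | [], tw => tw
  | (k, v) :: rest, tw =>
      if tw.size = 10 then tw
      else if PySem.Str.len k > 4 then topTenLoop rest (tw.insert k v)
      else topTenLoop rest tw

def top_ten (lst : List String) : List (String × Int) :=
  let dict_of_words : PySem.Dict String Int :=
    lst.foldl (fun d x =>
      match d.get? x with
      | none => d.insert x 1
      | some v => d.insert x (v + 1)) PySem.Dict.empty
  let dict_of_words2 : PySem.Dict String Int :=
    PySem.Dict.ofList (PySem.List.sorted dict_of_words.items (fun x => x.2) true)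
  (topTenLoop dict_of_words2.items PySem.Dict.empty).items

-- ===== PORT B =====
-- the body of B's bucket-building loop ('if c in buckets: append  else: [w]', then the running max)
def bucketStep (b : PySem.Dict Int (List String)) (p : String × Int) : PySem.Dict Int (List String) :=
  match b.get? p.2 with
  | some ws => b.insert p.2 (ws ++ [p.1])
  | none => b.insert p.2 [p.1]

def topStep (t : Int) (p : String × Int) : Int := if p.2 > t then p.2 else t

-- the body of B's emitting loop ('if len(result) < 10: result[w] = c')
def selStep (r : PySem.Dict String Int) (q : String × Int) : PySem.Dict String Int :=
  if r.size < 10 then r.insert q.1 q.2 else r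

def top_ten_alt (lst : List String) : List (String × Int) :=
  let counts : PySem.Dict String Int :=
    lst.foldl (fun d w =>
      if PySem.Str.len w > 4 then d.insert w (d.getD w 0 + 1) else d) PySem.Dict.empty
  let bt : PySem.Dict Int (List String) × Int :=
    counts.items.foldl (fun s p => (bucketStep s.1 p, topStep s.2 p)) (PySem.Dict.empty, 0)
  let result : PySem.Dict String Int :=
    (PySem.List.pyRange bt.2 0 (-1)).foldl (fun r c =>
      (bt.1.getD c []).foldl (fun r w => selStep r (w, c)) r) PySem.Dict.empty
  result.items

-- ===== PRECONDITION & SPEC =====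
def Spec_top_ten (lst : List String) (out : List (String × Int)) : Prop := out = top_ten_alt lst
instance (lst : List String) (out : List (String × Int)) : Decidable (Spec_top_ten lst out) := by unfold Spec_top_ten; infer_instance

-- ===== CLAIM (what is proved, stated in full; the proofs are below) =====
def Claim_equal_top_ten : Prop := ∀ (lst : List String), Dom_top_ten lst → Spec_top_ten lst (top_ten lst)

-- ===== LEMMAS AND PROOFS =====

-- the length test, as a Bool predicate on a word / on an item
def pvLong (w : String) : Bool := decide (PySem.Str.len w > 4)
def pvLongItem (kv : String × Int) : Bool := decide (PySem.Str.len kv.1 > 4)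

-- B's bucket walk as a flat list of (word, count) pairs: counts from n down to 1, each bucket in order
def pvBC (n : Nat) (J : List (String × Int)) : List (String × Int) :=
  (PySem.List.pyRange (n : Int) 0 (-1)).flatMap (fun c => J.filter (fun p => decide (p.2 = c)))

-- ---------- A-side lemmas ----------

theorem pv_insertBy_pairwise {α : Type} (key : α → Int) (x : α) (l : List α)
    (h : l.Pairwise (fun a b => key b ≤ key a)) :
    (PySem.List.insertBy (fun a b => decide (key b < key a)) x l).Pairwise
      (fun a b => key b ≤ key a) := by
  induction l with
  | nil => simp [PySem.List.insertBy]
  | cons y ys ih =>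
    rcases List.pairwise_cons.mp h with ⟨hy, hys⟩
    by_cases hb : key y < key x
    · simp only [PySem.List.insertBy, decide_eq_true_eq, if_pos hb]
      refine List.pairwise_cons.mpr ⟨?_, h⟩
      intro z hz
      rcases List.mem_cons.mp hz with rfl | hz
      · exact le_of_lt hb
      · exact (hy z hz).trans (le_of_lt hb)
    · simp only [PySem.List.insertBy, decide_eq_true_eq, if_neg hb]
      refine List.pairwise_cons.mpr ⟨?_, ih hys⟩
      intro z hz
      rcases (PySem.List.mem_insertBy _ x z ys).mp hz with rfl | hz
      · exact le_of_not_gt hb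
      · exact hy z hz

theorem pv_filter_insertBy {α : Type} (key : α → Int) (q : α → Bool) (x : α) (l : List α)
    (h : l.Pairwise (fun a b => key b ≤ key a)) :
    (PySem.List.insertBy (fun a b => decide (key b < key a)) x l).filter q =
      if q x then PySem.List.insertBy (fun a b => decide (key b < key a)) x (l.filter q)
      else l.filter q := by
  induction l with
  | nil => by_cases hq : q x <;> simp [PySem.List.insertBy, hq]
  | cons y ys ih =>
    rcases List.pairwise_cons.mp h with ⟨hy, hys⟩
    by_cases hb : key y < key x
    · simp only [PySem.List.insertBy, decide_eq_true_eq, if_pos hb]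
      by_cases hq : q x
      · rw [if_pos hq]
        rw [List.filter_cons_of_pos hq]
        rcases hf : (y :: ys).filter q with _ | ⟨z, t⟩
        · simp [PySem.List.insertBy]
        · have hz : z ∈ (y :: ys).filter q := by rw [hf]; exact List.mem_cons_self
          have hzmem := List.mem_of_mem_filter hz
          have hzy : key z ≤ key y := by
            rcases List.mem_cons.mp hzmem with rfl | hzys
            · exact le_refl _
            · exact hy z hzys
          have : key z < key x := lt_of_le_of_lt hzy hb
          simp [PySem.List.insertBy, this]
      · rw [if_neg hq, List.filter_cons_of_neg hq]
    · simp only [PySem.List.insertBy, decide_eq_true_eq, if_neg hb]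
      by_cases hqy : q y
      · rw [List.filter_cons_of_pos hqy, ih hys, List.filter_cons_of_pos hqy]
        by_cases hq : q x
        · rw [if_pos hq, if_pos hq]
          simp [PySem.List.insertBy, hb]
        · rw [if_neg hq, if_neg hq]
      · rw [List.filter_cons_of_neg hqy, ih hys, List.filter_cons_of_neg hqy]

theorem pv_filter_foldl_insertBy {α : Type} (key : α → Int) (q : α → Bool) :
    ∀ (xs : List α) (acc : List α), acc.Pairwise (fun a b => key b ≤ key a) →
    (xs.foldl (fun acc x => PySem.List.insertBy (fun a b => decide (key b < key a)) x acc) acc).filter q =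
      (xs.filter q).foldl (fun acc x => PySem.List.insertBy (fun a b => decide (key b < key a)) x acc) (acc.filter q) := by
  intro xs
  induction xs with
  | nil => intro acc _; simp
  | cons x xs ih =>
    intro acc hacc
    have hpw := pv_insertBy_pairwise key x acc hacc
    by_cases hq : q x
    · rw [List.filter_cons_of_pos hq]
      simp only [List.foldl_cons]
      rw [ih _ hpw, pv_filter_insertBy key q x acc hacc, if_pos hq]
    · rw [List.filter_cons_of_neg hq]
      simp only [List.foldl_cons]
      rw [ih _ hpw, pv_filter_insertBy key q x acc hacc, if_neg hq]

theorem pv_filter_sorted_rev {α : Type} (key : α → Int) (q : α → Bool) (xs : List α) :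
    (PySem.List.sorted xs key true).filter q = PySem.List.sorted (xs.filter q) key true := by
  rw [PySem.List.sorted_rev_eq_foldl_insertBy, PySem.List.sorted_rev_eq_foldl_insertBy]
  have := pv_filter_foldl_insertBy key q xs [] (List.Pairwise.nil)
  simpa using this

theorem pv_ofList_filter (p : String → Bool) (xs : List String) :
    PySem.Set.ofList (xs.filter p) = (PySem.Set.ofList xs).filter p := by
  have main : ∀ (ys : List String) (s : PySem.Set String),
      (ys.filter p).foldl PySem.Set.add (s.filter p) = (ys.foldl PySem.Set.add s).filter p := by
    intro ys
    induction ys with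
    | nil => intro s; simp
    | cons y t ih =>
      intro s
      by_cases hp : p y
      · rw [List.filter_cons_of_pos hp]
        simp only [List.foldl_cons]
        rw [← ih (PySem.Set.add s y)]
        congr 1
        by_cases hm : y ∈ s
        · have h1 : PySem.Set.add s y = s := by
            simp [PySem.Set.add]; exact hm
          have h2 : PySem.Set.add (s.filter p) y = s.filter p := by
            simp [PySem.Set.add]; exact ⟨hm, hp⟩
          rw [h1, h2]
        · have h1 : PySem.Set.add s y = s ++ [y] := by
            simp [PySem.Set.add]; exact hm
          have h2 : PySem.Set.add (s.filter p) y = s.filter p ++ [y] := by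
            simp [PySem.Set.add]; intro h; exact absurd h hm
          rw [h1, h2, List.filter_append, List.filter_cons_of_pos hp]; simp
      · rw [List.filter_cons_of_neg hp]
        simp only [List.foldl_cons]
        rw [← ih (PySem.Set.add s y)]
        congr 1
        by_cases hm : y ∈ s
        · have h1 : PySem.Set.add s y = s := by simp [PySem.Set.add]; exact hm
          rw [h1]
        · have h1 : PySem.Set.add s y = s ++ [y] := by
            simp [PySem.Set.add]; exact hm
          rw [h1, List.filter_append, List.filter_cons_of_neg hp]; simp
  have := main xs PySem.Set.empty
  simpa [PySem.Set.ofList, PySem.Set.empty] using this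

theorem pv_a_count (lst : List String) :
    lst.foldl (fun d x =>
      match d.get? x with
      | none => d.insert x 1
      | some v => d.insert x (v + 1)) (PySem.Dict.empty : PySem.Dict String Int) = PySem.Dict.counter lst := by
  rw [← PySem.Dict.foldl_insert_getD_add_one_eq_counter]
  congr 1
  funext d x
  cases h : d.get? x with
  | none => simp [PySem.Dict.getD_eq_get?_getD, h]
  | some v => simp [PySem.Dict.getD_eq_get?_getD, h]

theorem pv_b_count (lst : List String) :
    lst.foldl (fun d w =>
      if PySem.Str.len w > 4 then d.insert w (d.getD w 0 + 1) else d) (PySem.Dict.empty : PySem.Dict String Int) =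
      PySem.Dict.counter (lst.filter pvLong) := by
  rw [← PySem.Dict.foldl_insert_getD_add_one_eq_counter, List.foldl_filter]
  congr 1
  funext d w
  by_cases h : PySem.Str.len w > 4
  · rw [if_pos h, if_pos (by simpa [pvLong] using h)]
  · rw [if_neg h, if_neg (by simpa [pvLong] using h)]

theorem pv_items_filter (lst : List String) :
    (PySem.Dict.counter (lst.filter pvLong)).items =
      (PySem.Dict.counter lst).items.filter pvLongItem := by
  rw [PySem.Dict.items_counter, PySem.Dict.items_counter, List.filter_map]
  have hcmp : (pvLongItem ∘ fun k => (k, (List.count k lst : Int))) = pvLong := by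
    funext k; simp [pvLongItem, pvLong]
  rw [hcmp, ← pv_ofList_filter]
  apply List.map_congr_left
  intro k hk
  have hkf : k ∈ lst.filter pvLong := (PySem.Set.mem_ofList _ k).mp hk
  have : pvLong k = true := (List.mem_filter.mp hkf).2
  rw [List.count_filter this]

theorem pv_ofList_items (l : List (String × Int)) (h : (l.map Prod.fst).Nodup) :
    (PySem.Dict.ofList l).items = l := by
  have := PySem.Dict.items_foldl_insert_fresh l Prod.fst Prod.snd PySem.Dict.empty
    (fun a _ => PySem.Dict.contains_empty _) h
  simpa [PySem.Dict.ofList, PySem.Dict.update] using this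

theorem pv_topTenLoop_items (rest : List (String × Int)) (tw : PySem.Dict String Int)
    (hnd : tw.keys.Nodup) (hfresh : ∀ p ∈ rest, tw.contains p.1 = false)
    (hrest : (rest.map Prod.fst).Nodup) (hsz : tw.size ≤ 10) :
    (topTenLoop rest tw).items = tw.items ++ (rest.filter pvLongItem).take (10 - tw.size) := by
  induction rest generalizing tw with
  | nil => simp [topTenLoop]
  | cons p rest ih =>
    obtain ⟨k, v⟩ := p
    by_cases h10 : tw.size = 10
    · rw [topTenLoop, if_pos h10, h10]
      simp
    · have hlt : tw.size < 10 := lt_of_le_of_ne hsz h10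
      have hfk : tw.contains k = false := hfresh (k, v) List.mem_cons_self
      rw [List.map_cons] at hrest
      have hkmem : k ∉ rest.map Prod.fst := (List.nodup_cons.mp hrest).1
      rw [topTenLoop, if_neg h10]
      by_cases hq : PySem.Str.len k > 4
      · rw [if_pos hq]
        have hnd' : (tw.insert k v).keys.Nodup := PySem.Dict.nodup_keys_insert tw k v hnd
        have hfresh' : ∀ p ∈ rest, (tw.insert k v).contains p.1 = false := by
          intro p hp
          rw [PySem.Dict.contains_insert]
          have hne : p.1 ≠ k := by
            intro he
            exact hkmem (he ▸ List.mem_map_of_mem hp)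
          simp [hne, hfresh p (List.mem_cons_of_mem _ hp)]
        have hrest' : (rest.map Prod.fst).Nodup := (List.nodup_cons.mp hrest).2
        have hsize : (tw.insert k v).size = tw.size + 1 := by
          rw [PySem.Dict.size_insert, if_neg (by simp [hfk])]
        have hsz' : (tw.insert k v).size ≤ 10 := by omega
        rw [ih (tw.insert k v) hnd' hfresh' hrest' hsz']
        rw [PySem.Dict.items_insert_of_not_contains tw v hfk, hsize]
        rw [List.filter_cons_of_pos (by simpa [pvLongItem] using hq)]
        have harith : 10 - tw.size = (10 - (tw.size + 1)) + 1 := by omega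
        rw [harith, List.take_succ_cons, List.append_assoc]
        simp
      · rw [if_neg hq]
        have hrest' : (rest.map Prod.fst).Nodup := (List.nodup_cons.mp hrest).2
        rw [ih tw hnd (fun p hp => hfresh p (List.mem_cons_of_mem _ hp)) hrest' hsz]
        rw [List.filter_cons_of_neg (by simpa [pvLongItem] using hq)]

-- ---------- B-side lemmas ----------

-- the bucket dict holds, at key c, the first components of the items whose count is c
theorem pv_bucket_getD (J : List (String × Int)) :
    ∀ (d : PySem.Dict Int (List String)) (c : Int),
    (J.foldl bucketStep d).getD c [] = d.getD c [] ++ (J.filter (fun p => decide (p.2 = c))).map Prod.fst := by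
  induction J with
  | nil => intro d c; simp
  | cons p J ih =>
    intro d c
    have hstep : (bucketStep d p).getD c [] =
        d.getD c [] ++ (if p.2 = c then [p.1] else []) := by
      unfold bucketStep
      cases h : d.get? p.2 with
      | none =>
        rw [PySem.Dict.getD_insert]
        by_cases hc : c = p.2
        · subst hc
          simp [PySem.Dict.getD_eq_get?_getD, h]
        · simp [hc, Ne.symm hc]
      | some ws =>
        rw [PySem.Dict.getD_insert]
        by_cases hc : c = p.2
        · subst hc
          simp [PySem.Dict.getD_eq_get?_getD, h]
        · simp [hc, Ne.symm hc]
    rw [List.foldl_cons, ih (bucketStep d p) c, hstep, List.append_assoc]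
    by_cases hc : p.2 = c
    · rw [List.filter_cons_of_pos (by simpa using hc), if_pos hc]
      simp
    · rw [List.filter_cons_of_neg (by simpa using hc), if_neg hc]
      simp

theorem pv_top_le (J : List (String × Int)) : ∀ t : Int, t ≤ J.foldl topStep t := by
  induction J with
  | nil => intro t; simp
  | cons p J ih =>
    intro t
    refine le_trans ?_ (ih (topStep t p))
    unfold topStep
    split_ifs with h
    · exact le_of_lt h
    · exact le_refl t

theorem pv_top_bound (J : List (String × Int)) :
    ∀ (t : Int), ∀ p ∈ J, p.2 ≤ J.foldl topStep t := by
  induction J with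
  | nil => intro t p hp; cases hp
  | cons q J ih =>
    intro t p hp
    rcases List.mem_cons.mp hp with rfl | hp
    · refine le_trans ?_ (pv_top_le J (topStep t p))
      unfold topStep
      split_ifs with h
      · exact le_refl _
      · exact le_of_not_gt h
    · exact ih (topStep t q) p hp

-- every element of the bucket walk has a count between 1 and n
theorem pv_mem_pvBC {n : Nat} {J : List (String × Int)} {p : String × Int}
    (h : p ∈ pvBC n J) : 1 ≤ p.2 ∧ p.2 ≤ (n : Int) := by
  unfold pvBC at h
  rcases List.mem_flatMap.mp h with ⟨c, hc, hp⟩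
  rcases PySem.List.mem_pyRange_neg_one.mp hc with ⟨hc0, hcn⟩
  have := of_decide_eq_true (List.mem_filter.mp hp).2
  omega

theorem pv_insertBy_append {α : Type} (before : α → α → Bool) (x : α) (A R : List α)
    (h : ∀ a ∈ A, before x a = false) :
    PySem.List.insertBy before x (A ++ R) = A ++ PySem.List.insertBy before x R := by
  induction A with
  | nil => simp
  | cons a A ih =>
    have ha := h a List.mem_cons_self
    simp only [List.cons_append, PySem.List.insertBy, ha, Bool.false_eq_true, if_false]
    rw [ih (fun a ha => h a (List.mem_cons_of_mem _ ha))]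

theorem pv_insertBy_all_before {α : Type} (before : α → α → Bool) (x : α) (R : List α)
    (h : ∀ r ∈ R, before x r = true) :
    PySem.List.insertBy before x R = x :: R := by
  cases R with
  | nil => rfl
  | cons r R => simp [PySem.List.insertBy, h r List.mem_cons_self]

-- inserting one element into the bucket walk appends it to its bucket
theorem pv_insertBy_pvBC (n : Nat) :
    ∀ (J : List (String × Int)) (x : String × Int), 1 ≤ x.2 → x.2 ≤ (n : Int) →
    PySem.List.insertBy (fun a b => decide (b.2 < a.2)) x (pvBC n J) = pvBC n (J ++ [x]) := by
  induction n with
  | zero => intro J x h1 h2; exfalso; omega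
  | succ n ih =>
    intro J x h1 h2
    have hcast : (((n + 1 : Nat)) : Int) = (n : Int) + 1 := by push_cast; ring
    have hsub : ((n : Int) + 1) - 1 = (n : Int) := by ring
    have hsplit : pvBC (n + 1) J =
        J.filter (fun p => decide (p.2 = ((n : Int) + 1))) ++ pvBC n J := by
      unfold pvBC
      rw [hcast, PySem.List.pyRange_neg_one_cons (by omega), hsub, List.flatMap_cons]
    have hsplit' : pvBC (n + 1) (J ++ [x]) =
        (J ++ [x]).filter (fun p => decide (p.2 = ((n : Int) + 1))) ++ pvBC n (J ++ [x]) := by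
      unfold pvBC
      rw [hcast, PySem.List.pyRange_neg_one_cons (by omega), hsub, List.flatMap_cons]
    rw [hsplit, hsplit']
    by_cases hx : x.2 = (n : Int) + 1
    · -- x joins the topmost bucket; everything below it moves past
      rw [pv_insertBy_append _ x _ _ (by
        intro a ha
        have : a.2 = (n : Int) + 1 := of_decide_eq_true (List.mem_filter.mp ha).2
        simp [this, hx])]
      rw [pv_insertBy_all_before _ x _ (by
        intro r hr
        have := (pv_mem_pvBC hr).2
        simp only [decide_eq_true_eq]
        omega)]
      have hbc : pvBC n (J ++ [x]) = pvBC n J := by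
        unfold pvBC
        refine List.flatMap_congr ?_
        intro c hc
        rcases PySem.List.mem_pyRange_neg_one.mp hc with ⟨hc0, hcn⟩
        rw [List.filter_append]
        have : ¬ (x.2 = c) := by omega
        simp [this]
      rw [hbc, List.filter_append]
      simp [hx]
    · -- x's count is at most n: it lands below the topmost bucket
      have hx' : x.2 ≤ (n : Int) := by
        have : x.2 < (n : Int) + 1 := lt_of_le_of_ne (by push_cast at h2; omega) hx
        omega
      rw [pv_insertBy_append _ x _ _ (by
        intro a ha
        have : a.2 = (n : Int) + 1 := of_decide_eq_true (List.mem_filter.mp ha).2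
        simp only [decide_eq_false_iff_not]
        omega)]
      rw [ih J x h1 hx', List.filter_append]
      have : ¬ (x.2 = (n : Int) + 1) := hx
      simp [this]

-- the bucket walk IS the stable descending sort by count
theorem pv_sorted_eq_pvBC (n : Nat) (J : List (String × Int))
    (h : ∀ p ∈ J, 1 ≤ p.2 ∧ p.2 ≤ (n : Int)) :
    PySem.List.sorted J (fun p => p.2) true = pvBC n J := by
  induction J using List.reverseRecOn with
  | nil =>
    rw [PySem.List.sorted_rev_eq_foldl_insertBy]
    unfold pvBC
    simp
  | append_singleton J x ih =>
    have hJ : ∀ p ∈ J, 1 ≤ p.2 ∧ p.2 ≤ (n : Int) :=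
      fun p hp => h p (List.mem_append_left _ hp)
    have hx := h x (List.mem_append_right _ List.mem_cons_self)
    rw [PySem.List.sorted_rev_eq_foldl_insertBy, List.foldl_append, List.foldl_cons, List.foldl_nil]
    rw [← PySem.List.sorted_rev_eq_foldl_insertBy]
    rw [ih hJ]
    exact pv_insertBy_pvBC n J x hx.1 hx.2

-- B's emitting loop keeps the first ten pairs
theorem pv_sel_items (E : List (String × Int)) :
    ∀ (d : PySem.Dict String Int), d.keys.Nodup → (∀ p ∈ E, d.contains p.1 = false) →
    (E.map Prod.fst).Nodup → d.size ≤ 10 →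
    (E.foldl selStep d).items = d.items ++ E.take (10 - d.size) := by
  induction E with
  | nil => intro d _ _ _ _; simp
  | cons p E ih =>
    intro d hnd hfresh hE hsz
    rw [List.map_cons] at hE
    have hkmem : p.1 ∉ E.map Prod.fst := (List.nodup_cons.mp hE).1
    have hE' : (E.map Prod.fst).Nodup := (List.nodup_cons.mp hE).2
    rw [List.foldl_cons]
    by_cases h10 : d.size < 10
    · have hfk : d.contains p.1 = false := hfresh p List.mem_cons_self
      have hstep : selStep d p = d.insert p.1 p.2 := by
        unfold selStep; rw [if_pos h10]
      rw [hstep]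
      have hnd' : (d.insert p.1 p.2).keys.Nodup := PySem.Dict.nodup_keys_insert d _ _ hnd
      have hfresh' : ∀ q ∈ E, (d.insert p.1 p.2).contains q.1 = false := by
        intro q hq
        rw [PySem.Dict.contains_insert]
        have hne : q.1 ≠ p.1 := fun he => hkmem (he ▸ List.mem_map_of_mem hq)
        simp [hne, hfresh q (List.mem_cons_of_mem _ hq)]
      have hsize : (d.insert p.1 p.2).size = d.size + 1 := by
        rw [PySem.Dict.size_insert, if_neg (by simp [hfk])]
      rw [ih _ hnd' hfresh' hE' (by omega)]
      rw [PySem.Dict.items_insert_of_not_contains d _ hfk, hsize]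
      have harith : 10 - d.size = (10 - (d.size + 1)) + 1 := by omega
      rw [harith, List.take_succ_cons, List.append_assoc]
      simp
    · have hstep : selStep d p = d := by unfold selStep; rw [if_neg h10]
      have hsz10 : d.size = 10 := by omega
      rw [hstep, ih d hnd (fun q hq => hfresh q (List.mem_cons_of_mem _ hq)) hE' hsz]
      simp [hsz10]

-- ===== VERDICT (by name: the statement is the Claim_ definition above) =====
theorem top_ten_spec : Claim_equal_top_ten := by
  intro lst _
  unfold Spec_top_ten top_ten top_ten_alt
  rw [pv_a_count, pv_b_count]
  dsimp only
  -- the common item list: counts of the long words, stably sorted by count descending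
  set J := (PySem.Dict.counter (lst.filter pvLong)).items with hJ
  have hJfilter : J = (PySem.Dict.counter lst).items.filter pvLongItem := pv_items_filter lst
  have hkeysA : ((PySem.Dict.counter lst).items.map Prod.fst).Nodup := by
    simpa [PySem.Dict.keys] using PySem.Dict.nodup_keys_counter lst
  have hkeysJ : (J.map Prod.fst).Nodup := by
    rw [hJfilter]
    exact List.Nodup.sublist (List.Sublist.map Prod.fst List.filter_sublist) hkeysA
  set S := PySem.List.sorted J (fun p => p.2) true with hS
  have hSperm : S.Perm J := PySem.List.sorted_perm J (fun p => p.2) true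
  have hkeysS : (S.map Prod.fst).Nodup := ((hSperm.map Prod.fst).nodup_iff).mpr hkeysJ
  -- ==== A's side: sort everything, recast, filtered break-loop = S.take 10 ====
  have hsortperm := PySem.List.sorted_perm (PySem.Dict.counter lst).items (fun x => x.2) true
  have hndsorted :
      ((PySem.List.sorted (PySem.Dict.counter lst).items (fun x => x.2) true).map Prod.fst).Nodup :=
    ((hsortperm.map Prod.fst).nodup_iff).mpr hkeysA
  rw [pv_ofList_items _ hndsorted]
  rw [pv_topTenLoop_items _ PySem.Dict.empty (by simp [PySem.Dict.keys, PySem.Dict.empty])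
    (fun p _ => PySem.Dict.contains_empty _) hndsorted (by simp [PySem.Dict.size, PySem.Dict.empty])]
  have hAside :
      (PySem.List.sorted (PySem.Dict.counter lst).items (fun x => x.2) true).filter pvLongItem = S := by
    rw [pv_filter_sorted_rev (fun kv => kv.2) pvLongItem, ← hJfilter]
  rw [hAside]
  -- ==== B's side: buckets + downward walk = S.take 10 ====
  rw [PySem.List.foldl_prod_mk bucketStep topStep J PySem.Dict.empty 0]
  dsimp only
  set T := J.foldl topStep 0 with hT
  have hT0 : 0 ≤ T := pv_top_le J 0
  have hTcast : T = ((T.toNat : Nat) : Int) := (Int.toNat_of_nonneg hT0).symm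
  -- bounds on the counts in J
  have hpos : ∀ p ∈ J, 1 ≤ p.2 ∧ p.2 ≤ ((T.toNat : Nat) : Int) := by
    intro p hp
    constructor
    · rw [hJ, PySem.Dict.items_counter] at hp
      rcases List.mem_map.mp hp with ⟨k, hk, hkp⟩
      have hkmem : k ∈ lst.filter pvLong := (PySem.Set.mem_ofList _ k).mp hk
      have : 1 ≤ List.count k (lst.filter pvLong) := List.count_pos_iff.mpr hkmem
      rw [← hkp]
      dsimp only
      exact_mod_cast this
    · rw [← hTcast]
      exact pv_top_bound J 0 p hp
  -- the nested loops walk exactly pvBC T.toNat J and select its first ten pairs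
  have hloops :
      (PySem.List.pyRange T 0 (-1)).foldl (fun r c =>
        ((J.foldl bucketStep PySem.Dict.empty).getD c []).foldl (fun r w => selStep r (w, c)) r)
        PySem.Dict.empty = (pvBC T.toNat J).foldl selStep PySem.Dict.empty := by
    unfold pvBC
    rw [List.foldl_flatMap]
    rw [hTcast]
    refine PySem.List.foldl_congr_mem _ _ _ _ ?_
    intro acc c hc
    rw [pv_bucket_getD J PySem.Dict.empty c]
    have hempty : (PySem.Dict.empty : PySem.Dict Int (List String)).getD c [] = [] := by
      simp [PySem.Dict.getD_eq_get?_getD, PySem.Dict.empty, PySem.Dict.get?]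
    rw [hempty, List.nil_append, List.foldl_map]
    refine PySem.List.foldl_congr_mem _ _ _ _ ?_
    intro r p hp
    have hpc : p.2 = c := of_decide_eq_true (List.mem_filter.mp hp).2
    rw [← hpc]
  rw [hloops]
  rw [← pv_sorted_eq_pvBC T.toNat J hpos, ← hS]
  rw [pv_sel_items S PySem.Dict.empty (by simp [PySem.Dict.keys, PySem.Dict.empty])
    (fun p _ => PySem.Dict.contains_empty _) hkeysS (by simp [PySem.Dict.size, PySem.Dict.empty])]
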